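-- pv_equiv track=rewrite | github.com/Infini-AI-Lab/OLMo | download_data.py | normalize_prefixes
-- ===== SOURCE A (Python) =====
-- from typing import Any, List, Set
--
-- def normalize_prefixes(prefix_args: List[str]) -> List[str]:
--     """
--     Normalize a list of include-prefix arguments which may contain comma-separated values.
--     - Remove leading slashes
--     - Drop empty items
--     """
--     out: List[str] = []
--     for raw in prefix_args or []:
--         for token in raw.split(","):
--             token = token.strip()
--             if token:
--                 out.append(token.lstrip("/"))
--     return out
-- ===== SOURCE B (Python) =====
-- from typing import List
--
-- def normalize_prefixes(prefix_args: List[str]) -> List[str]: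
--     """Single character-level scan (DFA): no split/strip/lstrip calls.
--
--     Per token: state 0 skips leading whitespace, state 1 skips the leading
--     run of '/', state 2 collects content, buffering trailing whitespace in
--     `pend` so it is dropped at the token end (= right strip). A comma (or
--     the sentinel comma at the end of each arg) flushes the token.
--     """
--     out: List[str] = []
--     for raw in prefix_args or []:
--         tok: List[str] = []   # kept characters of the current token
--         pend: List[str] = []  # whitespace run not yet known to be inner
--         seen = False          # token had any non-whitespace character
--         st = 0                # 0: leading ws, 1: leading slashes, 2: content
--         for ch in raw + ',':  # sentinel comma flushes the final token
--             if ch == ',':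
--                 if seen:
--                     out.append(''.join(tok))
--                 tok, pend, seen, st = [], [], False, 0
--             elif st == 0:
--                 if not ch.isspace():
--                     seen = True
--                     if ch == '/':
--                         st = 1
--                     else:
--                         st = 2
--                         tok.append(ch)
--             elif st == 1:
--                 if ch != '/':
--                     st = 2
--                     if ch.isspace():
--                         pend.append(ch)
--                     else:
--                         tok.append(ch)
--             else:
--                 if ch.isspace():
--                     pend.append(ch)
--                 else:
--                     tok.extend(pend)
--                     pend = []
--                     tok.append(ch)
--     return out
-- ===== Notes on version B (the rewrite author's own statement) =====
-- stated objective: alternative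
-- what changed: Replaces A's split/strip/lstrip library pipeline with a single character-level state machine that classifies each character once (comma flushes the token; states skip leading whitespace and leading slashes; a pending buffer drops trailing whitespace), never materializing the split tokens.
import Mathlib
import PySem

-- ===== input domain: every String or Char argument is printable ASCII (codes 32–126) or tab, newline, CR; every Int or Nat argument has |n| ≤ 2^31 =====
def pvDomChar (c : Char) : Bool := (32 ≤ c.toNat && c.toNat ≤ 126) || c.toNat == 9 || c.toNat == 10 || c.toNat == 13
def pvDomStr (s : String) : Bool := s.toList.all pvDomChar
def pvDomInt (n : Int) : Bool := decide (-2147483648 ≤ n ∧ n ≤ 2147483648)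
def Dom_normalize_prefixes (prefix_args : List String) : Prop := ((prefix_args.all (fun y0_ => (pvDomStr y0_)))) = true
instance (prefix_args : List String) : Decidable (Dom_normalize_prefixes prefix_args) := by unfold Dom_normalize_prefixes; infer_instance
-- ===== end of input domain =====

-- B replaces A's split/strip/lstrip pipeline with a single character-level state machine; same output, alternative structure.

-- ===== PORT A =====
-- hand port of token.lstrip("/"): drop leading '/' characters — exact for the single-char set "/"
def lstripSlash (cs : List Char) : List Char := cs.dropWhile (fun c => c == '/')

def normalize_prefixes (prefix_args : List String) : List String :=
  -- 'prefix_args or []' is prefix_args itself for a list argument (empty list falsy → [])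
  prefix_args.foldl (fun out raw =>
    (PySem.Chars.splitOn raw.toList [',']).foldl (fun out token =>
      let token := PySem.Chars.strip token
      if !token.isEmpty then out ++ [String.ofList (lstripSlash token)] else out) out) []

-- ===== PORT B =====
-- the DFA state of Source B's inner loop: (out, tok, pend, seen, st)
structure DfaSt where
  out : List String
  tok : List Char
  pend : List Char
  seen : Bool
  st : Nat
deriving Repr, DecidableEq

-- one character of Source B's scan
def dfaStep (s : DfaSt) (ch : Char) : DfaSt :=
  if ch = ',' then
    { out := if s.seen then s.out ++ [String.ofList s.tok] else s.out,
      tok := [], pend := [], seen := false, st := 0 }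
  else if s.st = 0 then
    if ¬ (PySem.Chars.isspace ch = true) then
      if ch = '/' then { s with seen := true, st := 1 }
      else { s with seen := true, st := 2, tok := s.tok ++ [ch] }
    else s
  else if s.st = 1 then
    if ch ≠ '/' then
      if PySem.Chars.isspace ch then { s with st := 2, pend := s.pend ++ [ch] }
      else { s with st := 2, tok := s.tok ++ [ch] }
    else s
  else
    if PySem.Chars.isspace ch then { s with pend := s.pend ++ [ch] }
    else { s with tok := s.tok ++ s.pend ++ [ch], pend := [] }

def normalize_prefixes_alt (prefix_args : List String) : List String :=
  prefix_args.foldl (fun out raw =>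
    ((raw.toList ++ [',']).foldl dfaStep ⟨out, [], [], false, 0⟩).out) []

-- ===== PRECONDITION & SPEC =====
def Spec_normalize_prefixes (prefix_args : List String) (out : List String) : Prop := out = normalize_prefixes_alt prefix_args
instance (prefix_args : List String) (out : List String) : Decidable (Spec_normalize_prefixes prefix_args out) := by unfold Spec_normalize_prefixes; infer_instance

-- ===== CLAIM (what is proved, stated in full; the proofs are below) =====
def Claim_equal_normalize_prefixes : Prop := ∀ (prefix_args : List String), Dom_normalize_prefixes prefix_args → Spec_normalize_prefixes prefix_args (normalize_prefixes prefix_args)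

-- ===== LEMMAS AND PROOFS =====

-- a fuel-free reference splitter for single-char separator ','
def pvSplit : List Char → List (List Char)
  | [] => [[]]
  | c :: rest =>
    if c = ',' then [] :: pvSplit rest
    else match pvSplit rest with
      | [] => [[c]]
      | h :: t => (c :: h) :: t

def pvConsHead (pre : List Char) : List (List Char) → List (List Char)
  | [] => [pre]
  | h :: t => (pre ++ h) :: t

-- the per-token contribution both programs produce
def tokVal (t : List Char) : List String :=
  if (PySem.Chars.strip t).isEmpty then []
  else [String.ofList (lstripSlash (PySem.Chars.strip t))]

theorem pvSplit_ne_nil (l : List Char) : pvSplit l ≠ [] := by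
  cases l with
  | nil => simp [pvSplit]
  | cons c rest =>
    simp only [pvSplit]
    split
    · simp
    · split <;> simp_all

theorem go_spec (fuel : Nat) (l cur : List Char) (acc : List (List Char))
    (h : l.length ≤ fuel) :
    PySem.Chars.splitOn.go [','] fuel l cur acc = acc.reverse ++ pvConsHead cur.reverse (pvSplit l) := by
  induction fuel generalizing l cur acc with
  | zero =>
    have : l = [] := by cases l <;> simp_all
    subst this
    simp [PySem.Chars.splitOn.go, pvSplit, pvConsHead]
  | succ n ih =>
    cases l with
    | nil => simp [PySem.Chars.splitOn.go, pvSplit, pvConsHead]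
    | cons c rest =>
      simp only [PySem.Chars.splitOn.go]
      by_cases hc : c = ','
      · subst hc
        rw [if_pos (by simp [List.isPrefixOf])]
        rw [ih _ _ _ (by simpa using Nat.le_of_succ_le_succ (by simpa using h))]
        cases hs : pvSplit rest with
        | nil => exact absurd hs (pvSplit_ne_nil rest)
        | cons h' t' => simp [pvSplit, pvConsHead, hs]
      · rw [if_neg (by simp [List.isPrefixOf]; exact fun hh => hc hh.symm)]
        rw [ih _ _ _ (by simpa using Nat.le_of_succ_le_succ (by simpa using h))]
        cases hs : pvSplit rest with
        | nil => exact absurd hs (pvSplit_ne_nil rest)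
        | cons h' t' => simp [pvSplit, pvConsHead, hs, hc]

theorem splitOn_comma (l : List Char) : PySem.Chars.splitOn l [','] = pvSplit l := by
  rw [PySem.Chars.splitOn, go_spec _ _ _ _ (by omega)]
  cases hs : pvSplit l with
  | nil => exact absurd hs (pvSplit_ne_nil l)
  | cons h t => simp [pvConsHead]

-- A's per-raw fold, as a flatMap of per-token values
theorem A_eq_flatMap (prefix_args : List String) :
    normalize_prefixes prefix_args =
      prefix_args.flatMap (fun raw => (pvSplit raw.toList).flatMap tokVal) := by
  unfold normalize_prefixes
  have hfun : (fun (out : List String) (raw : String) =>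
      (PySem.Chars.splitOn raw.toList [',']).foldl (fun out token =>
        let token := PySem.Chars.strip token
        if !token.isEmpty then out ++ [String.ofList (lstripSlash token)] else out) out)
    = (fun out raw => out ++ (pvSplit raw.toList).flatMap tokVal) := by
    funext out raw
    rw [splitOn_comma]
    rw [PySem.List.foldl_append_if (fun t => !(PySem.Chars.strip t).isEmpty)
      (fun t => String.ofList (lstripSlash (PySem.Chars.strip t))) _ out]
    congr 1
    induction pvSplit raw.toList with
    | nil => simp
    | cons a l ih =>
      by_cases h : (PySem.Chars.strip a).isEmpty <;>
        simp [tokVal, h, ih]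
  rw [hfun, PySem.List.foldl_append_eq_flatMap]
  simp

-- the pieces of pvSplit contain no comma
theorem pvSplit_no_comma (l : List Char) : ∀ p ∈ pvSplit l, ',' ∉ p := by
  induction l with
  | nil => simp [pvSplit]
  | cons c rest ih =>
    by_cases hc : c = ','
    · simpa [pvSplit, hc] using ih
    · simp only [pvSplit, if_neg hc]
      cases hs : pvSplit rest with
      | nil => simp [Ne.symm hc]
      | cons h t =>
        intro p hp
        rcases List.mem_cons.mp hp with rfl | hp
        · have := ih h (by simp [hs])
          simp [Ne.symm hc, this]
        · exact ih p (by simp [hs, hp])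

-- reassembling: l ++ [','] is the pieces each followed by a comma
theorem pvSplit_reassemble (l : List Char) :
    l ++ [','] = (pvSplit l).flatMap (fun p => p ++ [',']) := by
  induction l with
  | nil => simp [pvSplit]
  | cons c rest ih =>
    by_cases hc : c = ','
    · simp [pvSplit, hc, ← ih]
    · simp only [pvSplit, if_neg hc]
      cases hs : pvSplit rest with
      | nil => exact absurd hs (pvSplit_ne_nil rest)
      | cons h t =>
        rw [hs] at ih
        simpa using ih

-- ---- string facts about rstrip ----

theorem rstrip_append_cons (v w : List Char) (c : Char) (hc : PySem.Chars.isspace c = false) :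
    PySem.Chars.rstrip (v ++ c :: w) = v ++ c :: PySem.Chars.rstrip w := by
  simp only [PySem.Chars.rstrip, List.reverse_append, List.reverse_cons]
  rw [List.append_assoc, List.dropWhile_append]
  have h2 : List.dropWhile PySem.Chars.isspace ([c] ++ v.reverse) = [c] ++ v.reverse := by
    simp [hc]
  by_cases hw : (List.dropWhile PySem.Chars.isspace w.reverse).isEmpty
  · rw [if_pos hw, h2]
    rw [List.isEmpty_iff] at hw
    simp [hw]
  · rw [if_neg hw]
    simp

theorem rstrip_append_all_ws (x y : List Char) (h : ∀ c ∈ y, PySem.Chars.isspace c = true) :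
    PySem.Chars.rstrip (x ++ y) = PySem.Chars.rstrip x := by
  simp only [PySem.Chars.rstrip, List.reverse_append]
  rw [List.dropWhile_append]
  rw [List.dropWhile_eq_nil_iff.mpr (by intro c hc; exact h c (by simpa using hc))]
  simp

theorem rstrip_all_ws (y : List Char) (h : ∀ c ∈ y, PySem.Chars.isspace c = true) :
    PySem.Chars.rstrip y = [] := by
  simp only [PySem.Chars.rstrip]
  rw [List.dropWhile_eq_nil_iff.mpr (by intro x hx; exact h x (by simpa using hx))]
  rfl

theorem rstrip_append_of_ne_nil (x y : List Char) (h : PySem.Chars.rstrip y ≠ []) :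
    PySem.Chars.rstrip (x ++ y) = x ++ PySem.Chars.rstrip y := by
  simp only [PySem.Chars.rstrip, List.reverse_append] at *
  have h' : List.dropWhile PySem.Chars.isspace y.reverse ≠ [] := fun hh => h (by simp [hh])
  rw [List.dropWhile_append, if_neg (by simpa [List.isEmpty_iff] using h')]
  simp

theorem rstrip_no_ws (y : List Char) (h : ∀ c ∈ y, PySem.Chars.isspace c = false) :
    PySem.Chars.rstrip y = y := by
  simp only [PySem.Chars.rstrip]
  rw [List.dropWhile_eq_self_iff.mpr]
  · simp
  · intro hl hp
    have hm : y.reverse[0] ∈ y := by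
      have := List.getElem_mem (l := y.reverse) (n := 0) hl
      simp only [List.mem_reverse] at this
      exact this
    rw [h _ hm] at hp
    cases hp

theorem dropWhile_cons_false {p : Char → Bool} {l ds : List Char} {d : Char}
    (h : l.dropWhile p = d :: ds) : p d = false := by
  induction l with
  | nil => simp at h
  | cons a l ih =>
    by_cases hp : p a = true
    · rw [List.dropWhile_cons, if_pos hp] at h; exact ih h
    · rw [List.dropWhile_cons, if_neg hp] at h
      injection h with h1 _
      subst h1
      simpa using hp

theorem rstrip_prefix (l : List Char) : PySem.Chars.rstrip l <+: l := by
  simp only [PySem.Chars.rstrip]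
  rw [← l.reverse_reverse, List.reverse_prefix, l.reverse_reverse]
  exact List.dropWhile_suffix _

-- the bridge: lstrip-slash after strip = rstrip after lstrip-slash, on a left-stripped string
theorem bridge (t : List Char) :
    lstripSlash (PySem.Chars.strip t) =
      PySem.Chars.rstrip (lstripSlash (PySem.Chars.lstrip t)) := by
  have hstrip : PySem.Chars.strip t = PySem.Chars.rstrip (PySem.Chars.lstrip t) := rfl
  set r := PySem.Chars.lstrip t with hr
  set b := r.dropWhile (fun c => c == '/') with hb
  set sl := r.takeWhile (fun c => c == '/') with hsl
  have hsplit : r = sl ++ b := (List.takeWhile_append_dropWhile).symm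
  have hsl_slash : ∀ c ∈ sl, c = '/' := by
    intro c hc; simpa using List.mem_takeWhile_imp hc
  have hsl_nil : sl.dropWhile (fun c => c == '/') = [] :=
    List.dropWhile_eq_nil_iff.mpr (by intro c hc; simp [hsl_slash c hc])
  show lstripSlash (PySem.Chars.strip t) = PySem.Chars.rstrip b
  rw [hstrip]
  cases hbs : PySem.Chars.rstrip b with
  | nil =>
    have hball : ∀ c ∈ b, PySem.Chars.isspace c = true := by
      have : List.dropWhile PySem.Chars.isspace b.reverse = [] := by
        have := hbs
        simp only [PySem.Chars.rstrip] at this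
        exact List.reverse_eq_nil_iff.mp this
      intro c hc
      exact List.dropWhile_eq_nil_iff.mp this c (by simpa using hc)
    rw [hsplit, rstrip_append_all_ws _ _ hball,
        rstrip_no_ws sl (by intro c hc; rw [hsl_slash c hc]; decide)]
    exact hsl_nil
  | cons d bs =>
    have hbne : b ≠ [] := by
      intro hbn; rw [hbn] at hbs; simp [PySem.Chars.rstrip] at hbs
    have hdns : (d == '/') = false := by
      have hpre := rstrip_prefix b
      rw [hbs] at hpre
      rcases hpre with ⟨u, hu⟩
      have hbcons : List.dropWhile (fun c : Char => c == '/') r = d :: (bs ++ u) := by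
        rw [← hb, ← hu]; simp
      exact dropWhile_cons_false (p := fun c => c == '/') hbcons
    rw [hsplit, rstrip_append_of_ne_nil _ _ (by rw [hbs]; simp), hbs]
    unfold lstripSlash
    rw [List.dropWhile_append, if_pos (by simp [hsl_nil])]
    simp [hdns]

theorem strip_isEmpty_iff (t : List Char) :
    (PySem.Chars.strip t).isEmpty = (PySem.Chars.lstrip t).isEmpty := by
  have hstrip : PySem.Chars.strip t = PySem.Chars.rstrip (PySem.Chars.lstrip t) := rfl
  rw [hstrip]
  cases hr : PySem.Chars.lstrip t with
  | nil => simp [PySem.Chars.rstrip]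
  | cons c r' =>
    have hcns : PySem.Chars.isspace c = false :=
      dropWhile_cons_false (p := PySem.Chars.isspace)
        (by simpa [PySem.Chars.lstrip] using hr)
    have : PySem.Chars.rstrip (c :: r') = c :: PySem.Chars.rstrip r' := by
      simpa using rstrip_append_cons [] r' c hcns
    simp [this]

-- ---- DFA lemmas ----

-- leading whitespace is skipped in state 0
theorem dfa_ws (w : List Char) (s : DfaSt) (hst : s.st = 0)
    (hw : ∀ c ∈ w, PySem.Chars.isspace c = true ∧ c ≠ ',') :
    w.foldl dfaStep s = s := by
  induction w with
  | nil => rfl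
  | cons c w ih =>
    obtain ⟨hws, hnc⟩ := hw c (by simp)
    have hstep : dfaStep s c = s := by
      simp [dfaStep, hnc, hst, hws]
    rw [List.foldl_cons, hstep, ih (fun c hc => hw c (by simp [hc]))]

-- state-2 invariant: content collects, trailing whitespace pends
theorem dfa_content (u : List Char) (out : List String) (tok pend : List Char)
    (hu : ∀ c ∈ u, c ≠ ',') (hp : ∀ c ∈ pend, PySem.Chars.isspace c = true) :
    ∃ pend', (∀ c ∈ pend', PySem.Chars.isspace c = true) ∧
      u.foldl dfaStep ⟨out, tok, pend, true, 2⟩ =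
        ⟨out, tok ++ PySem.Chars.rstrip (pend ++ u), pend', true, 2⟩ := by
  induction u generalizing tok pend with
  | nil =>
    exact ⟨pend, hp, by simp [rstrip_all_ws pend hp]⟩
  | cons c u ih =>
    have hnc : c ≠ ',' := hu c (by simp)
    by_cases hws : PySem.Chars.isspace c = true
    · have hstep : dfaStep ⟨out, tok, pend, true, 2⟩ c = ⟨out, tok, pend ++ [c], true, 2⟩ := by
        simp [dfaStep, hnc, hws]
      obtain ⟨pend', hp', heq⟩ := ih tok (pend ++ [c]) (fun c hc => hu c (by simp [hc]))
        (by intro x hx; rcases List.mem_append.mp hx with h | h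
            · exact hp x h
            · simp at h; subst h; exact hws)
      exact ⟨pend', hp', by rw [List.foldl_cons, hstep, heq]; simp⟩
    · have hws' : PySem.Chars.isspace c = false := by simpa using hws
      have hstep : dfaStep ⟨out, tok, pend, true, 2⟩ c = ⟨out, tok ++ pend ++ [c], [], true, 2⟩ := by
        simp [dfaStep, hnc, hws']
      obtain ⟨pend', hp', heq⟩ := ih (tok ++ pend ++ [c]) [] (fun c hc => hu c (by simp [hc]))
        (by simp)
      refine ⟨pend', hp', ?_⟩
      rw [List.foldl_cons, hstep, heq]
      rw [show pend ++ c :: u = pend ++ c :: u from rfl,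
          rstrip_append_cons pend u c hws']
      simp

-- the core token lemma: scanning a comma-free token then a comma appends tokVal
-- state 1 absorbs further slashes
theorem dfa_slash1 (sl : List Char) (out : List String) (h : ∀ c ∈ sl, c = '/') :
    sl.foldl dfaStep ⟨out, [], [], true, 1⟩ = ⟨out, [], [], true, 1⟩ := by
  induction sl with
  | nil => rfl
  | cons c sl ih =>
    have hc : c = '/' := h c (by simp)
    subst hc
    have hstep : dfaStep ⟨out, [], [], true, 1⟩ '/' = ⟨out, [], [], true, 1⟩ := by
      simp [dfaStep]
    rw [List.foldl_cons, hstep, ih (fun c hc => h c (by simp [hc]))]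

theorem dfa_token (t : List Char) (out : List String) (ht : ',' ∉ t) :
    (t ++ [',']).foldl dfaStep ⟨out, [], [], false, 0⟩ =
      ⟨out ++ tokVal t, [], [], false, 0⟩ := by
  have hw_split : t = t.takeWhile PySem.Chars.isspace ++ t.dropWhile PySem.Chars.isspace :=
    (List.takeWhile_append_dropWhile).symm
  set w := t.takeWhile PySem.Chars.isspace with hw
  set r := t.dropWhile PySem.Chars.isspace with hrdef
  have hr_lstrip : PySem.Chars.lstrip t = r := rfl
  have hr_mem : ∀ c ∈ r, c ∈ t := fun c hc => (List.dropWhile_suffix _).subset hc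
  have hfold_w : w.foldl dfaStep (⟨out, [], [], false, 0⟩ : DfaSt) = ⟨out, [], [], false, 0⟩ := by
    apply dfa_ws _ _ rfl
    intro c hc
    have hws := List.mem_takeWhile_imp hc
    exact ⟨hws, by rintro rfl; revert hws; decide⟩
  have hsplit2 : t ++ [','] = w ++ (r ++ [',']) := by rw [← List.append_assoc, ← hw_split]
  rw [hsplit2, List.foldl_append, hfold_w]
  -- now scan r then the comma from the fresh state
  cases hrc : r with
  | nil =>
    have hstrip : (PySem.Chars.strip t).isEmpty = true := by
      rw [strip_isEmpty_iff, hr_lstrip, hrc]; rfl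
    simp [dfaStep, tokVal, hstrip]
  | cons c r' =>
    have hempty : (PySem.Chars.strip t).isEmpty = false := by
      rw [strip_isEmpty_iff, hr_lstrip, hrc]; rfl
    have hval : tokVal t =
        [String.ofList (PySem.Chars.rstrip (lstripSlash r))] := by
      rw [tokVal, if_neg (by simp [hempty]), bridge, hr_lstrip]
    set b := r.dropWhile (fun c => c == '/') with hbdef
    have hb_mem : ∀ c ∈ b, c ∈ t := fun c hc => hr_mem c ((List.dropWhile_suffix _).subset hc)
    -- after scanning r, the machine holds rstrip b as tok, in state 2 (or state ≤1 with empty tok)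
    have hr_nc : ∀ x ∈ r, x ≠ ',' := fun x hx h => ht (h ▸ hr_mem x hx)
    have hscan : ∃ pend' seen' st', seen' = true ∧
        r.foldl dfaStep (⟨out, [], [], false, 0⟩ : DfaSt) =
          ⟨out, PySem.Chars.rstrip b, pend', seen', st'⟩ ∧
        (∀ c ∈ pend', True) := by
      have hwsc : PySem.Chars.isspace c = false :=
        dropWhile_cons_false (p := PySem.Chars.isspace) (by rw [← hrdef, hrc])
      have hsl_split : r = r.takeWhile (fun c => c == '/') ++ b :=
        (List.takeWhile_append_dropWhile).symm
      have hb_nc : ∀ x ∈ b, x ≠ ',' :=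
        fun x hx => hr_nc x ((List.dropWhile_suffix _).subset hx)
      cases hsl : r.takeWhile (fun c => c == '/') with
      | nil =>
        -- no leading slashes: first char enters state 2 directly
        have hb_eq : b = c :: r' := by
          have := hsl_split
          rw [hsl, List.nil_append] at this
          rw [← this, hrc]
        have hslc : (c == '/') = false :=
          dropWhile_cons_false (p := fun c => c == '/') (hbdef ▸ hb_eq)
        have hstep1 : dfaStep ⟨out, [], [], false, 0⟩ c = ⟨out, [c], [], true, 2⟩ := by
          simp [dfaStep, hr_nc c (by rw [hrc]; simp), hwsc, by simpa using hslc]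
        obtain ⟨pend', hp', heq⟩ := dfa_content r' out [c] []
          (fun x hx => hr_nc x (by rw [hrc]; simp [hx])) (by simp)
        refine ⟨pend', true, 2, rfl, ?_, fun _ _ => trivial⟩
        have hcons : PySem.Chars.rstrip (c :: r') = c :: PySem.Chars.rstrip r' := by
          simpa using rstrip_append_cons [] r' c hwsc
        rw [hrc, List.foldl_cons, hstep1, heq, hb_eq, hcons]
        simp
      | cons c0 sl' =>
        have hc0 : c0 = '/' := by
          have := List.mem_takeWhile_imp (l := r) (p := fun c => c == '/') (x := c0)
            (by rw [hsl]; simp)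
          simpa using this
        subst hc0
        have hsl'_slash : ∀ x ∈ sl', x = '/' := by
          intro x hx
          have := List.mem_takeWhile_imp (l := r) (p := fun c => c == '/') (x := x)
            (by rw [hsl]; simp [hx])
          simpa using this
        have hstep1 : dfaStep ⟨out, [], [], false, 0⟩ '/' = ⟨out, [], [], true, 1⟩ := by
          simp [dfaStep]; decide
        have hfold_sl : (('/' :: sl').foldl dfaStep (⟨out, [], [], false, 0⟩ : DfaSt)) =
            ⟨out, [], [], true, 1⟩ := by
          rw [List.foldl_cons, hstep1, dfa_slash1 sl' out hsl'_slash]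
        rw [hsl_split, hsl, List.foldl_append, hfold_sl]
        cases hbc : b with
        | nil =>
          refine ⟨[], true, 1, rfl, ?_, fun _ _ => trivial⟩
          simp [PySem.Chars.rstrip]
        | cons d b' =>
          have hsld : (d == '/') = false :=
            dropWhile_cons_false (p := fun c => c == '/') (hbdef ▸ hbc)
          have hd_nc : d ≠ ',' := hb_nc d (by rw [hbc]; simp)
          have hb'_nc : ∀ x ∈ b', x ≠ ',' := fun x hx => hb_nc x (by rw [hbc]; simp [hx])
          by_cases hwd : PySem.Chars.isspace d = true
          · have hstep2 : dfaStep ⟨out, [], [], true, 1⟩ d = ⟨out, [], [d], true, 2⟩ := by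
              simp [dfaStep, hd_nc, hwd, by simpa using hsld]
            obtain ⟨pend', hp', heq⟩ := dfa_content b' out [] [d] hb'_nc
              (by intro x hx; simp at hx; subst hx; exact hwd)
            refine ⟨pend', true, 2, rfl, ?_, fun _ _ => trivial⟩
            rw [List.foldl_cons, hstep2, heq]
            simp
          · have hwd' : PySem.Chars.isspace d = false := by simpa using hwd
            have hstep2 : dfaStep ⟨out, [], [], true, 1⟩ d = ⟨out, [d], [], true, 2⟩ := by
              simp [dfaStep, hd_nc, hwd', by simpa using hsld]
            obtain ⟨pend', hp', heq⟩ := dfa_content b' out [d] [] hb'_nc (by simp)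
            refine ⟨pend', true, 2, rfl, ?_, fun _ _ => trivial⟩
            have hcons : PySem.Chars.rstrip (d :: b') = d :: PySem.Chars.rstrip b' := by
              simpa using rstrip_append_cons [] b' d hwd'
            rw [List.foldl_cons, hstep2, heq, hcons]
            simp
    obtain ⟨pend', seen', st', hseen, heq, -⟩ := hscan
    rw [List.foldl_append, ← hrc, heq]
    subst hseen
    have : dfaStep ⟨out, PySem.Chars.rstrip b, pend', true, st'⟩ ',' =
        ⟨out ++ [String.ofList (PySem.Chars.rstrip b)], [], [], false, 0⟩ := by
      simp [dfaStep]
    rw [List.foldl_cons, this, hval]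
    rfl

-- scanning a flat list of comma-terminated comma-free pieces appends their values
theorem dfa_pieces (ps : List (List Char)) (out : List String)
    (hp : ∀ p ∈ ps, ',' ∉ p) :
    (ps.flatMap (fun p => p ++ [','])).foldl dfaStep ⟨out, [], [], false, 0⟩ =
      ⟨out ++ ps.flatMap tokVal, [], [], false, 0⟩ := by
  induction ps generalizing out with
  | nil => simp
  | cons p ps ih =>
    rw [List.flatMap_cons, List.foldl_append, dfa_token p out (hp p (by simp)),
        ih (out ++ tokVal p) (fun q hq => hp q (by simp [hq]))]
    simp

theorem B_eq_flatMap (prefix_args : List String) :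
    normalize_prefixes_alt prefix_args =
      prefix_args.flatMap (fun raw => (pvSplit raw.toList).flatMap tokVal) := by
  unfold normalize_prefixes_alt
  have hfun : (fun (out : List String) (raw : String) =>
      ((raw.toList ++ [',']).foldl dfaStep ⟨out, [], [], false, 0⟩).out)
      = (fun out raw => out ++ (pvSplit raw.toList).flatMap tokVal) := by
    funext out raw
    rw [pvSplit_reassemble, dfa_pieces _ _ (pvSplit_no_comma _)]
  rw [hfun, PySem.List.foldl_append_eq_flatMap]
  simp

-- ===== VERDICT (by name: the statement is the Claim_ definition above) =====
theorem normalize_prefixes_spec : Claim_equal_normalize_prefixes := by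
  intro prefix_args _
  unfold Spec_normalize_prefixes
  rw [A_eq_flatMap, B_eq_flatMap]
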